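-- pv_equiv track=rewrite | github.com/Joji0/CP-Library | scripts/build_site.py | strip_auto_sections
-- ===== SOURCE A (Python) =====
-- AUTO_HEADINGS = ["## Depends on", "## Required by", "## Verified with", "## Source Code"]
--
-- def strip_auto_sections(content):
-- 	"""Remove all auto-generated sections."""
-- 	positions = []
-- 	for heading in AUTO_HEADINGS:
-- 		idx = content.find(heading)
-- 		if idx != -1:
-- 			positions.append(idx)
-- 	if positions:
-- 		content = content[:min(positions)].rstrip()
-- 	return content
-- ===== SOURCE B (Python) =====
-- AUTO_HEADINGS = ["## Depends on", "## Required by", "## Verified with", "## Source Code"]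
--
-- def strip_auto_sections(content):
-- 	"""Remove all auto-generated sections (single left-to-right scan)."""
-- 	for i in range(len(content)):
-- 		if any(content.startswith(h, i) for h in AUTO_HEADINGS):
-- 			return content[:i].rstrip()
-- 	return content
-- ===== Notes on version B (the rewrite author's own statement) =====
-- stated objective: alternative
-- what changed: Replaces four whole-string find() passes plus a list/min step by a single left-to-right scan over positions that stops at the first position where any auto-heading starts, then truncates there and rstrips.
import Mathlib
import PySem

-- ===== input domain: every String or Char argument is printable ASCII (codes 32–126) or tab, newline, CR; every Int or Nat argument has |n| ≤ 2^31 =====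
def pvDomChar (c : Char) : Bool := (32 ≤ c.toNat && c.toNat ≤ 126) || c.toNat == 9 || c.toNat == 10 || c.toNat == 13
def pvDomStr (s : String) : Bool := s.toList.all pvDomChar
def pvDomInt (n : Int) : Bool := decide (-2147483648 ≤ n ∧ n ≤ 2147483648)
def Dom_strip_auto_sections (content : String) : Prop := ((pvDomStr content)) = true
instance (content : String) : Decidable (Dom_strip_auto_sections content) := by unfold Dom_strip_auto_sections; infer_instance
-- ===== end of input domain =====

-- B replaces A's four whole-string find() passes plus list/min by one left-to-right scan
-- that stops at the first position where any auto-heading starts (objective: alternative).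

def pvHEADINGS : List String := ["## Depends on", "## Required by", "## Verified with", "## Source Code"]

-- ===== PORT A =====
def strip_auto_sections (content : String) : String :=
  let positions : List Int := pvHEADINGS.foldl (fun acc heading =>
    if PySem.Str.find content heading ≠ -1 then acc ++ [PySem.Str.find content heading] else acc) []
  if positions.isEmpty then content
  else
    match PySem.List.min? positions (fun x => x) with
    | some m => PySem.Str.rstrip (PySem.Str.slice content none (some m))
    | none => content

-- ===== PORT B =====
-- loop 'for i in range(len(content))' over suffixes; checks each heading as a prefix of the tail
def pvScan : List Char → Option Nat
  | [] => none
  | c :: t =>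
    if pvHEADINGS.any (fun h => PySem.Chars.startswith (c :: t) h.toList) then some 0
    else (pvScan t).map (· + 1)

def strip_auto_sections_alt (content : String) : String :=
  match pvScan content.toList with
  | some i => PySem.Str.rstrip (PySem.Str.slice content none (some (i : Int)))
  | none => content

-- ===== PRECONDITION & SPEC =====
def Spec_strip_auto_sections (content : String) (out : String) : Prop := out = strip_auto_sections_alt content
instance (content : String) (out : String) : Decidable (Spec_strip_auto_sections content out) := by unfold Spec_strip_auto_sections; infer_instance

-- ===== CLAIM (what is proved, stated in full; the proofs are below) =====
def Claim_equal_strip_auto_sections : Prop := ∀ (content : String), Dom_strip_auto_sections content → Spec_strip_auto_sections content (strip_auto_sections content)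

-- ===== LEMMAS AND PROOFS =====

theorem pvHEADINGS_ne_nil : ∀ h ∈ pvHEADINGS, h.toList ≠ [] := by decide

theorem pvFoldl_filter (content : String) (l : List String) (acc : List Int) :
    l.foldl (fun acc heading =>
      if PySem.Str.find content heading ≠ -1 then acc ++ [PySem.Str.find content heading] else acc) acc
    = acc ++ (l.map (fun h => PySem.Str.find content h)).filter (fun x => x ≠ -1) := by
  induction l generalizing acc with
  | nil => simp
  | cons h t ih =>
    simp only [List.foldl_cons, List.map_cons, List.filter_cons]
    by_cases hc : PySem.Chars.find content.toList h.toList = -1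
    · rw [if_neg (by simpa [PySem.Str.find_eq] using hc), ih]
      simp [hc]
    · rw [if_pos (by simpa [PySem.Str.find_eq] using hc), ih]
      simp [hc]

theorem pvScan_eq_none_iff (cs : List Char) :
    pvScan cs = none ↔ ∀ h ∈ pvHEADINGS, ¬ h.toList <:+: cs := by
  induction cs with
  | nil =>
    refine ⟨fun _ h hm hin => pvHEADINGS_ne_nil h hm ?_, fun _ => rfl⟩
    exact List.eq_nil_of_infix_nil hin
  | cons c t ih =>
    by_cases hany : (pvHEADINGS.any (fun h => PySem.Chars.startswith (c :: t) h.toList)) = true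
    · rw [pvScan, if_pos hany]
      obtain ⟨h, hm, hsw⟩ := List.any_eq_true.mp hany
      constructor
      · intro hcontra
        exact (Option.some_ne_none _ hcontra).elim
      · intro hall
        exact absurd ((PySem.Chars.startswith_iff _ _).mp hsw).isInfix (hall h hm)
    · rw [pvScan, if_neg hany, Option.map_eq_none_iff, ih]
      have hnp : ∀ h ∈ pvHEADINGS, ¬ h.toList <+: (c :: t) := by
        intro h hm hp
        exact hany (List.any_eq_true.mpr ⟨h, hm, (PySem.Chars.startswith_iff _ _).mpr hp⟩)
      constructor
      · intro hall h hm hin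
        rcases List.infix_cons_iff.mp hin with hp | hin'
        · exact hnp h hm hp
        · exact hall h hm hin'
      · intro hall h hm hin
        exact hall h hm (List.infix_cons_iff.mpr (Or.inr hin))

theorem pvScan_spec (cs : List Char) (k : Nat) (h : pvScan cs = some k) :
    (∃ hd ∈ pvHEADINGS, hd.toList <+: cs.drop k) ∧
      ∀ j < k, ∀ hd ∈ pvHEADINGS, ¬ hd.toList <+: cs.drop j := by
  induction cs generalizing k with
  | nil => simp [pvScan] at h
  | cons c t ih =>
    by_cases hany : (pvHEADINGS.any (fun hd => PySem.Chars.startswith (c :: t) hd.toList)) = true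
    · rw [pvScan, if_pos hany] at h
      obtain rfl : (0 : Nat) = k := Option.some.inj h
      obtain ⟨hd, hm, hsw⟩ := List.any_eq_true.mp hany
      exact ⟨⟨hd, hm, by simpa using (PySem.Chars.startswith_iff _ _).mp hsw⟩,
        fun j hj => absurd hj (by omega)⟩
    · rw [pvScan, if_neg hany] at h
      obtain ⟨k', hk', rfl⟩ := Option.map_eq_some_iff.mp h
      obtain ⟨⟨hd, hm, hp⟩, hmin⟩ := ih k' hk'
      refine ⟨⟨hd, hm, by simpa using hp⟩, ?_⟩
      intro j hj hd' hm' hp'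
      cases j with
      | zero =>
        exact hany (List.any_eq_true.mpr
          ⟨hd', hm', (PySem.Chars.startswith_iff _ _).mpr (by simpa using hp')⟩)
      | succ j' =>
        exact hmin j' (by omega) hd' hm' (by simpa using hp')

-- ===== VERDICT (by name: the statement is the Claim_ definition above) =====
theorem strip_auto_sections_spec : Claim_equal_strip_auto_sections := by
  intro content _
  show strip_auto_sections content = strip_auto_sections_alt content
  unfold strip_auto_sections strip_auto_sections_alt
  rw [pvFoldl_filter]
  simp only [List.nil_append]
  set cs := content.toList with hcs
  set P : List Int :=
    (pvHEADINGS.map (fun h => PySem.Str.find content h)).filter (fun x => x ≠ -1) with hPdef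
  have memP : ∀ x : Int, x ∈ P ↔ (∃ hd ∈ pvHEADINGS, PySem.Str.find content hd = x) ∧ x ≠ -1 := by
    intro x
    rw [hPdef, List.mem_filter]
    simp
  by_cases hocc : ∀ hd ∈ pvHEADINGS, ¬ hd.toList <:+: cs
  · -- no heading occurs: both return content unchanged
    have hPnil : P = [] := by
      rw [List.eq_nil_iff_forall_not_mem]
      intro x hx
      obtain ⟨⟨hd, hm, hfx⟩, hxne⟩ := (memP x).mp hx
      apply hxne
      rw [← hfx, PySem.Str.find_eq]
      exact (PySem.Chars.find_eq_neg_one_iff _ _).mpr (hocc hd hm)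
    rw [hPnil, (pvScan_eq_none_iff cs).mpr hocc]
    simp
  · -- some heading occurs
    push_neg at hocc
    obtain ⟨hd0, hm0, hin0⟩ := hocc
    have hf0 : PySem.Str.find content hd0 ≠ -1 := by
      rw [PySem.Str.find_eq]
      exact fun hEq => ((PySem.Chars.find_eq_neg_one_iff _ _).mp hEq) hin0
    have hPne : P ≠ [] := by
      intro hnil
      have : PySem.Str.find content hd0 ∈ P := (memP _).mpr ⟨⟨hd0, hm0, rfl⟩, hf0⟩
      simp [hnil] at this
    cases hmq : PySem.List.min? P (fun x => x) with
    | none => exact absurd ((PySem.List.min?_eq_none_iff P _).mp hmq) hPne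
    | some m =>
      obtain ⟨⟨hd1, hm1, hfd1⟩, hmne⟩ := (memP m).mp (PySem.List.min?_mem hmq)
      have hm_ge : 0 ≤ m := by
        have h1 := PySem.Chars.neg_one_le_find content.toList hd1.toList
        rw [← PySem.Str.find_eq, hfd1] at h1
        omega
      have hfd1' : PySem.Chars.find cs hd1.toList = m := by rw [← PySem.Str.find_eq]; exact hfd1
      have hspec1 := PySem.Chars.find_spec (s := cs) (sub := hd1.toList) (by rw [hfd1']; exact hm_ge)
      rw [hfd1'] at hspec1
      cases hk : pvScan cs with
      | none =>
        exfalso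
        exact ((pvScan_eq_none_iff cs).mp hk) hd0 hm0 hin0
      | some k =>
        obtain ⟨⟨hd2, hm2, hp2⟩, hmin2⟩ := pvScan_spec cs k hk
        -- k ≤ m.toNat
        have hk_le : k ≤ m.toNat := by
          by_contra hlt
          exact hmin2 m.toNat (by omega) hd1 hm1 hspec1.1
        -- find of hd2 bounds m above by k
        have hin2 : hd2.toList <:+: cs := hp2.isInfix.trans (List.drop_suffix k cs).isInfix
        have hf2_ge : 0 ≤ PySem.Chars.find cs hd2.toList := by
          have h1 := PySem.Chars.neg_one_le_find cs hd2.toList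
          have h2 := (PySem.Chars.find_eq_neg_one_iff cs hd2.toList).not.mpr (by simp [hin2])
          omega
        have hspec2 := PySem.Chars.find_spec (s := cs) (sub := hd2.toList) hf2_ge
        have hf2_le : (PySem.Chars.find cs hd2.toList).toNat ≤ k := by
          by_contra hgt
          exact hspec2.2 k (by omega) hp2
        have hf2P : PySem.Chars.find cs hd2.toList ∈ P := by
          refine (memP _).mpr ⟨⟨hd2, hm2, ?_⟩, by omega⟩
          rw [PySem.Str.find_eq]
        have hm_le : m ≤ PySem.Chars.find cs hd2.toList := PySem.List.min?_isMin hmq _ hf2P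
        have hmk : m = (k : Int) := by omega
        rw [if_neg (by simpa using hPne), hmk]
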